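-- pv_equiv track=rewrite | github.com/mrbartrns/algorithm-and-structure | programmers/lv4_review/p14_1.py | solution
-- ===== SOURCE A (Python) =====
-- import heapq
--
-- INF = 987654321
--
-- def dijkstra(start, distance, graph):
--     q = []
--     distance[start] = 0
--     heapq.heappush(q, (0, start))
--     while q:
--         dist, now = heapq.heappop(q)
--         if distance[now] < dist:
--             continue
--
--         for i in graph[now]:
--             cost = dist + 1
--             if distance[i] > cost:
--                 distance[i] = cost
--                 heapq.heappush(q, (cost, i))
--
-- def solution(n, edges):
--     graph = [[] for _ in range(n + 1)]
--     distance = [INF] * (n + 1)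
--     for a, b in edges:
--         graph[a].append(b)
--         graph[b].append(a)
--     dijkstra(1, distance, graph)
--     start = 1
--     dist = 0
--     for i in range(1, n + 1):
--         if dist < distance[i]:
--             start = i
--             dist = distance[i]
--
--     distance = [INF] * (n + 1)
--     dijkstra(start, distance, graph)
--
--     dist = 0
--     idx = 1
--     unique = True
--     for i in range(1, n + 1):
--         if dist < distance[i]:
--             unique = True
--             idx = i
--             dist = distance[i]
--         elif dist == distance[i]:
--             unique = False
--             idx = i
--
--     if not unique:
--         return dist
--
--     distance = [INF] * (n + 1)
--     dijkstra(idx, distance, graph)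
--     unique = True
--     dist = 0
--     for i in range(1, n + 1):
--         if dist < distance[i]:
--             dist = distance[i]
--             unique = True
--         elif dist == distance[i]:
--             unique = False
--
--     return dist if not unique else dist - 1
-- ===== SOURCE B (Python) =====
-- INF = 987654321
--
--
-- def solution(n, edges):
--     graph = [[] for _ in range(n + 1)]
--     for a, b in edges:
--         graph[a].append(b)
--         graph[b].append(a)
--
--     def bfs(src):
--         dist = [INF] * (n + 1)
--         dist[src] = 0
--         frontier = [src]
--         d = 0
--         while frontier:
--             nxt = []
--             for v in frontier:
--                 for w in graph[v]:
--                     if dist[w] > d + 1: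
--                         dist[w] = d + 1
--                         nxt.append(w)
--             frontier = nxt
--             d += 1
--         return dist
--
--     def far(dist):
--         m, first, last, cnt = 0, 1, 1, 0
--         for i in range(1, n + 1):
--             v = dist[i]
--             if v > m:
--                 m, first, last, cnt = v, i, i, 1
--             elif v == m:
--                 last, cnt = i, cnt + 1
--         return m, first, last, cnt
--
--     _, start, _, _ = far(bfs(1))
--     m, _, idx, cnt = far(bfs(start))
--     if m == 0 or cnt > 1:
--         return m
--     m, _, _, cnt = far(bfs(idx))
--     if m == 0 or cnt > 1:
--         return m
--     return m - 1
-- ===== Notes on version B (the rewrite author's own statement) =====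
-- stated objective: alternative
-- what changed: Replaces A's three heapq-based Dijkstra runs with plain level-by-level BFS (valid because every edge weight is 1), and folds A's three hand-written farthest-node scan loops into one far() helper returning (max, first, last, count); intended as faster (O(V+E) vs O(E log V) per source) but measured only ~1.2x on the generated inputs.
import Mathlib
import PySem

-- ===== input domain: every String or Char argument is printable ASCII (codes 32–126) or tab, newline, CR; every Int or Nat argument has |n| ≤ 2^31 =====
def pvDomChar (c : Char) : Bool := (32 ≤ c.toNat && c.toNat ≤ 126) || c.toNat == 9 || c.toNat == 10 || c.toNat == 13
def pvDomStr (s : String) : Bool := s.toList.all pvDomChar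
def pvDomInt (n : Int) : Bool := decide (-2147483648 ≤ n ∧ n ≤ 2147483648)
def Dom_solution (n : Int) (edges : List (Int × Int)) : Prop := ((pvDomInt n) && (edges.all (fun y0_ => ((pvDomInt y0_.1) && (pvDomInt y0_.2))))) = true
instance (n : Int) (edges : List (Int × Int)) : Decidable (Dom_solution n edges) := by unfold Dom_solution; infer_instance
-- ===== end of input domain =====

-- B replaces A's heap-based Dijkstra (all edge weights are 1) by a plain level-by-level BFS
-- and folds A's three hand-written farthest-node scans into one helper; same return value.

-- ===== PORT A =====

def pvINF : Int := 987654321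

-- distance[i] / graph[i] with Python index semantics (negative i wraps); 0-default only hit outside Pre_.
def pvGetI (xs : List Int) (i : Int) : Int := PySem.List.pyGetD xs i 0

def pvGetL (g : List (List Int)) (i : Int) : List Int := PySem.List.pyGetD g i []

-- 'graph = [[] for _ in range(n+1)]; for a, b in edges: graph[a].append(b); graph[b].append(a)'
-- (these lines are identical in A and in B; both ports share this helper)
def pvBuildGraph (n : Int) (edges : List (Int × Int)) : List (List Int) :=
  edges.foldl
    (fun g e =>
      let g1 := PySem.List.pySetD g e.1 (pvGetL g e.1 ++ [e.2])
      PySem.List.pySetD g1 e.2 (pvGetL g1 e.2 ++ [e.1]))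
    (List.replicate (n + 1).toNat [])

-- total adjacency size, used only to size the fuel of the loop below (tail-recursive)
def pvDeg (g : List (List Int)) : Nat := g.foldl (fun a l => a + l.length) 0

-- heapq on a list of pairs: heappop returns the lexicographically smallest entry (exact value-wise)
def pvPopMin : List (Int × Int) → Option ((Int × Int) × List (Int × Int))
  | [] => none
  | x :: xs =>
    match pvPopMin xs with
    | none => some (x, [])
    | some (m, rest) =>
      if x.1 < m.1 ∨ (x.1 = m.1 ∧ x.2 ≤ m.2) then some (x, xs) else some (m, x :: rest)

-- 'while q:' of A's dijkstra; fuel only makes the recursion total, the loop stops when q is empty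
def pvDijLoop (graph : List (List Int)) : Nat → List Int → List (Int × Int) → List Int
  | 0, dist, _ => dist
  | fuel + 1, dist, q =>
    match pvPopMin q with
    | none => dist
    | some (p, q') =>
      if pvGetI dist p.2 < p.1 then pvDijLoop graph fuel dist q'
      else
        let s := (pvGetL graph p.2).foldl
          (fun (s : List Int × List (Int × Int)) i =>
            if p.1 + 1 < pvGetI s.1 i then
              (PySem.List.pySetD s.1 i (p.1 + 1), s.2 ++ [(p.1 + 1, i)])
            else s)
          (dist, q')
        pvDijLoop graph fuel s.1 s.2

def pvDijkstra (start : Int) (distance : List Int) (graph : List (List Int)) : List Int :=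
  pvDijLoop graph
    (distance.length * pvINF.toNat * (pvDeg graph + 1) + 2)
    (PySem.List.pySetD distance start 0) [(0, start)]

-- each scan loop 'for i in range(1, n+1): … distance[i] …' reads exactly the tail
-- distance[1:] in order (distance has length n+1): ported as a fold over
-- zip(range(1, n+1), distance[1:]) — the same (index, value) pairs in the same order
def solution (n : Int) (edges : List (Int × Int)) : Int :=
  let graph := pvBuildGraph n edges
  let distance1 := pvDijkstra 1 (List.replicate (n + 1).toNat pvINF) graph
  let s1 := (List.zip (PySem.List.pyRange 1 (n + 1) 1) (distance1.drop 1)).foldl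
    (fun (s : Int × Int) p =>
      if s.2 < p.2 then (p.1, p.2) else s) (1, 0)
  let distance2 := pvDijkstra s1.1 (List.replicate (n + 1).toNat pvINF) graph
  let s2 := (List.zip (PySem.List.pyRange 1 (n + 1) 1) (distance2.drop 1)).foldl
    (fun (s : Int × Int × Bool) p =>
      if s.1 < p.2 then (p.2, p.1, true)
      else if s.1 = p.2 then (s.1, p.1, false)
      else s) (0, 1, true)
  if s2.2.2 = false then s2.1
  else
    let distance3 := pvDijkstra s2.2.1 (List.replicate (n + 1).toNat pvINF) graph
    let s3 := (List.zip (PySem.List.pyRange 1 (n + 1) 1) (distance3.drop 1)).foldl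
      (fun (s : Int × Bool) p =>
        if s.1 < p.2 then (p.2, true)
        else if s.1 = p.2 then (s.1, false)
        else s) (0, true)
    if s3.2 = false then s3.1 else s3.1 - 1

-- ===== PORT B =====

-- 'while frontier:' of B's bfs; fuel only makes the recursion total
def pvBfsLoop (graph : List (List Int)) : Nat → List Int → List Int → Int → List Int
  | 0, dist, _, _ => dist
  | fuel + 1, dist, frontier, d =>
    if frontier.isEmpty then dist
    else
      let s := frontier.foldl
        (fun (s : List Int × List Int) v =>
          (pvGetL graph v).foldl
            (fun (s : List Int × List Int) w =>
              if d + 1 < pvGetI s.1 w then (PySem.List.pySetD s.1 w (d + 1), s.2 ++ [w])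
              else s) s)
        (dist, [])
      pvBfsLoop graph fuel s.1 s.2 (d + 1)

def pvBfs (n : Int) (graph : List (List Int)) (src : Int) : List Int :=
  pvBfsLoop graph (2 * (n + 1).toNat * pvINF.toNat + 2)
    (PySem.List.pySetD (List.replicate (n + 1).toNat pvINF) src 0) [src] 0

-- B's far(dist) = (m, first, last, cnt); like A's scans, the range loop is ported as a
-- fold over zip(range(1, n+1), dist[1:])
def pvFar (n : Int) (dist : List Int) : Int × Int × Int × Int :=
  (List.zip (PySem.List.pyRange 1 (n + 1) 1) (dist.drop 1)).foldl
    (fun (s : Int × Int × Int × Int) p =>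
      if s.1 < p.2 then (p.2, p.1, p.1, 1)
      else if s.1 = p.2 then (s.1, s.2.1, p.1, s.2.2.2 + 1)
      else s) (0, 1, 1, 0)

def solution_alt (n : Int) (edges : List (Int × Int)) : Int :=
  let graph := pvBuildGraph n edges
  let f1 := pvFar n (pvBfs n graph 1)
  let f2 := pvFar n (pvBfs n graph f1.2.1)
  if f2.1 = 0 ∨ 1 < f2.2.2.2 then f2.1
  else
    let f3 := pvFar n (pvBfs n graph f2.2.2.1)
    if f3.1 = 0 ∨ 1 < f3.2.2.2 then f3.1
    else f3.1 - 1

-- ===== PRECONDITION & SPEC =====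

-- Pre_ excludes exactly the inputs on which the Python A raises IndexError:
-- n ≤ 0 (distance[1] does not exist) or an edge endpoint outside Python's accepted
-- index range [-(n+1), n] for a list of length n+1.
def Pre_solution (n : Int) (edges : List (Int × Int)) : Prop :=
  1 ≤ n ∧ ∀ e ∈ edges, (-(n + 1) ≤ e.1 ∧ e.1 ≤ n) ∧ (-(n + 1) ≤ e.2 ∧ e.2 ≤ n)

instance (n : Int) (edges : List (Int × Int)) : Decidable (Pre_solution n edges) := by
  unfold Pre_solution; infer_instance

def pvWitness_solution : Int × (List (Int × Int)) := (3, [(1, 2), (2, 3)])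

def Spec_solution (n : Int) (edges : List (Int × Int)) (out : Int) : Prop := out = solution_alt n edges
instance (n : Int) (edges : List (Int × Int)) (out : Int) : Decidable (Spec_solution n edges out) := by unfold Spec_solution; infer_instance

-- ===== CLAIM (what is proved, stated in full; the proofs are below) =====
def Claim_equal_solution : Prop := ∀ (n : Int) (edges : List (Int × Int)), Dom_solution n edges → Pre_solution n edges → Spec_solution n edges (solution n edges)

-- ===== LEMMAS AND PROOFS =====

-- ---- basic machinery: normalized indices, distance as a function ----

def pvNrm (L : Nat) (i : Int) : Nat := (if i < 0 then i + L else i).toNat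

def pvRng (L : Nat) (i : Int) : Prop := -(L : Int) ≤ i ∧ i < (L : Int)

def pvD (xs : List Int) (v : Nat) : Int := xs.getD v 0

def pvAdj (g : List (List Int)) (v : Nat) : List Int := g.getD v []

theorem pvNrm_lt {L : Nat} {i : Int} (h : pvRng L i) : pvNrm L i < L := by
  rcases h with ⟨h1, h2⟩; unfold pvNrm; split <;> omega

theorem pvNrm_of_nonneg {L : Nat} {i : Int} (h : 0 ≤ i) : pvNrm L i = i.toNat := by
  unfold pvNrm; split <;> omega

theorem pvIdx_eq {L : Nat} {i : Int} (h : pvRng L i) :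
    PySem.List.pyIdx? L i = some (pvNrm L i) := by
  rcases h with ⟨h1, h2⟩
  by_cases h0 : 0 ≤ i
  · simp only [PySem.List.pyIdx?, if_pos h0, if_pos h2, pvNrm, if_neg (by omega : ¬ i < 0)]
  · simp only [PySem.List.pyIdx?, if_neg h0, if_pos h1, pvNrm, if_pos (by omega : i < 0)]
    congr 1
    omega

theorem pvGetI_eq {xs : List Int} {L : Nat} {i : Int} (hl : xs.length = L) (h : pvRng L i) :
    pvGetI xs i = pvD xs (pvNrm L i) := by
  have hlt : pvNrm L i < L := pvNrm_lt h
  simp only [pvGetI, PySem.List.pyGetD, PySem.List.pyGet?, hl, pvIdx_eq h, Option.bind_some, pvD]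
  rw [List.getElem?_eq_getElem (by omega), List.getD_eq_getElem _ _ (by omega)]
  rfl

theorem pvGetL_eq {g : List (List Int)} {L : Nat} {i : Int} (hl : g.length = L) (h : pvRng L i) :
    pvGetL g i = pvAdj g (pvNrm L i) := by
  have hlt : pvNrm L i < L := pvNrm_lt h
  simp only [pvGetL, PySem.List.pyGetD, PySem.List.pyGet?, hl, pvIdx_eq h, Option.bind_some, pvAdj]
  rw [List.getElem?_eq_getElem (by omega), List.getD_eq_getElem _ _ (by omega)]
  rfl

theorem pvSetD_eq {α : Type} {xs : List α} {L : Nat} {i : Int} {v : α} (hl : xs.length = L) (h : pvRng L i) :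
    PySem.List.pySetD xs i v = xs.set (pvNrm L i) v := by
  simp only [PySem.List.pySetD, PySem.List.pySet?, hl, pvIdx_eq h, Option.map_some, Option.getD_some]

theorem pvD_set {xs : List Int} {k : Nat} (hk : k < xs.length) (c : Int) (v : Nat) :
    pvD (xs.set k c) v = if v = k then c else pvD xs v := by
  simp only [pvD, List.getD, List.getElem?_set]
  by_cases hv : v = k
  · subst hv; simp [hk]
  · rw [if_neg (fun h : k = v => hv h.symm), if_neg hv]
-- ---- sums (termination measure), heap-pop, graph sanity ----

def pvSum (xs : List Int) (L : Nat) : Int := ∑ v ∈ Finset.range L, pvD xs v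

theorem pvSum_nonneg {xs : List Int} {L : Nat} (h : ∀ v, v < L → 0 ≤ pvD xs v) :
    0 ≤ pvSum xs L :=
  Finset.sum_nonneg (fun v hv => h v (Finset.mem_range.1 hv))

theorem pvSum_le {xs : List Int} {L : Nat} (h : ∀ v, v < L → pvD xs v ≤ pvINF) :
    pvSum xs L ≤ (L : Int) * pvINF := by
  calc pvSum xs L ≤ ∑ _v ∈ Finset.range L, pvINF :=
        Finset.sum_le_sum (fun v hv => h v (Finset.mem_range.1 hv))
    _ = (L : Int) * pvINF := by simp [mul_comm]

theorem pvSum_set {xs : List Int} {L : Nat} {k : Nat} (hkL : k < L) (hk : k < xs.length) (c : Int) :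
    pvSum (xs.set k c) L = pvSum xs L - pvD xs k + c := by
  unfold pvSum
  have h : ∀ v ∈ Finset.range L, pvD (xs.set k c) v
      = pvD xs v + (if v = k then c - pvD xs k else 0) := by
    intro v _
    rw [pvD_set hk]
    by_cases hv : v = k
    · simp [hv]
    · simp [hv]
  rw [Finset.sum_congr rfl h, Finset.sum_add_distrib,
      Finset.sum_ite_eq' (Finset.range L) k (fun _ => c - pvD xs k)]
  simp only [Finset.mem_range.2 hkL, if_pos]
  ring

theorem pvPopMin_eq_none {q : List (Int × Int)} : pvPopMin q = none ↔ q = [] := by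
  cases q with
  | nil => simp [pvPopMin]
  | cons x xs =>
    simp only [pvPopMin]
    rcases h : pvPopMin xs with _ | ⟨m, rest⟩ <;> simp
    split <;> simp

theorem pvPopMin_perm : ∀ {q : List (Int × Int)} {p : Int × Int} {rest : List (Int × Int)},
    pvPopMin q = some (p, rest) → q.Perm (p :: rest) := by
  intro q
  induction q with
  | nil => intro p rest h; simp [pvPopMin] at h
  | cons x xs ih =>
    intro p rest h
    simp only [pvPopMin] at h
    rcases h2 : pvPopMin xs with _ | ⟨m, r⟩ <;> (rw [h2] at h; dsimp only at h)
    · have hx : xs = [] := pvPopMin_eq_none.1 h2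
      subst hx
      simp only [Option.some.injEq, Prod.mk.injEq] at h
      rw [← h.1, ← h.2]
    · by_cases hc : x.1 < m.1 ∨ (x.1 = m.1 ∧ x.2 ≤ m.2)
      · rw [if_pos hc] at h
        simp only [Option.some.injEq, Prod.mk.injEq] at h
        rw [← h.1, ← h.2]
      · rw [if_neg hc] at h
        simp only [Option.some.injEq, Prod.mk.injEq] at h
        rw [← h.1, ← h.2]
        exact ((ih h2).cons x).trans (List.Perm.swap m x r)

-- graph sanity: right length, every stored neighbour in Python's index range
def pvGraphOK (g : List (List Int)) (L : Nat) : Prop :=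
  g.length = L ∧ ∀ v, v < L → ∀ w ∈ pvAdj g v, pvRng L w

theorem pvAdj_mem {g : List (List Int)} {v : Nat} (h : v < g.length) : pvAdj g v ∈ g := by
  unfold pvAdj
  rw [List.getD_eq_getElem _ _ h]
  exact List.getElem_mem h

theorem pvBuildGraph_pres {n : Int} {L : Nat} (hLI : (L : Int) = n + 1) :
    ∀ (es : List (Int × Int)) (g : List (List Int)),
      (∀ e ∈ es, (-(n + 1) ≤ e.1 ∧ e.1 ≤ n) ∧ (-(n + 1) ≤ e.2 ∧ e.2 ≤ n)) →
      g.length = L → (∀ l ∈ g, ∀ w ∈ l, pvRng L w) →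
      (es.foldl (fun g e =>
          let g1 := PySem.List.pySetD g e.1 (pvGetL g e.1 ++ [e.2])
          PySem.List.pySetD g1 e.2 (pvGetL g1 e.2 ++ [e.1])) g).length = L ∧
        ∀ l ∈ es.foldl (fun g e =>
          let g1 := PySem.List.pySetD g e.1 (pvGetL g e.1 ++ [e.2])
          PySem.List.pySetD g1 e.2 (pvGetL g1 e.2 ++ [e.1])) g, ∀ w ∈ l, pvRng L w := by
  intro es
  induction es with
  | nil => intro g _ h1 h2; exact ⟨h1, h2⟩
  | cons e es ih =>
    intro g he h1 h2
    have hre1 : pvRng L e.1 := by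
      have := (he e (by simp)).1; unfold pvRng; omega
    have hre2 : pvRng L e.2 := by
      have := (he e (by simp)).2; unfold pvRng; omega
    simp only [List.foldl_cons]
    apply ih _ (fun e' he' => he e' (by simp [he']))
    · simp only [pvSetD_eq h1 hre1, pvSetD_eq (by simp [h1] : (g.set (pvNrm L e.1) (pvGetL g e.1 ++ [e.2])).length = L) hre2]
      simp [h1]
    · -- membership in the twice-updated list
      set g1 : List (List Int) := g.set (pvNrm L e.1) (pvGetL g e.1 ++ [e.2]) with hg1
      have hg1len : g1.length = L := by simp [hg1, h1]
      have hmem1 : ∀ l ∈ g1, ∀ w ∈ l, pvRng L w := by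
        intro l hl w hw
        rcases List.mem_or_eq_of_mem_set hl with hl' | hl'
        · exact h2 l hl' w hw
        · subst hl'
          rcases List.mem_append.1 hw with hw' | hw'
          · rw [pvGetL_eq h1 hre1] at hw'
            exact h2 _ (pvAdj_mem (by rw [h1]; exact pvNrm_lt hre1)) _ hw'
          · simp at hw'; subst hw'; exact hre2
      intro l hl w hw
      rw [pvSetD_eq h1 hre1, ← hg1, pvSetD_eq hg1len hre2] at hl
      rcases List.mem_or_eq_of_mem_set hl with hl' | hl'
      · exact hmem1 l hl' w hw
      · subst hl'
        rcases List.mem_append.1 hw with hw' | hw'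
        · rw [pvGetL_eq hg1len hre2] at hw'
          exact hmem1 _ (pvAdj_mem (by rw [hg1len]; exact pvNrm_lt hre2)) _ hw'
        · simp at hw'; subst hw'; exact hre1

theorem pvBuildGraph_ok {n : Int} {edges : List (Int × Int)} (hn : 1 ≤ n)
    (hE : ∀ e ∈ edges, (-(n + 1) ≤ e.1 ∧ e.1 ≤ n) ∧ (-(n + 1) ≤ e.2 ∧ e.2 ≤ n)) :
    pvGraphOK (pvBuildGraph n edges) (n + 1).toNat := by
  have hLI : (((n + 1).toNat : Nat) : Int) = n + 1 := by omega
  have h := pvBuildGraph_pres hLI edges (List.replicate (n + 1).toNat []) hE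
    (by simp) (by intro l hl w hw; rw [List.eq_of_mem_replicate hl] at hw; simp at hw)
  exact ⟨h.1, fun v hv w hw => h.2 _ (pvAdj_mem (by omega)) w hw⟩
-- ---- walks and the (order-independent) characterisation of the final distance array ----

inductive pvWalk (g : List (List Int)) (L : Nat) (s : Nat) : Nat → Nat → Prop
  | zero : pvWalk g L s s 0
  | step {v k w} : pvWalk g L s v k → w ∈ pvAdj g v → pvWalk g L s (pvNrm L w) (k + 1)

theorem pvWalk_lt {g : List (List Int)} {L : Nat} {s : Nat}
    (hAdj : ∀ v, v < L → ∀ w ∈ pvAdj g v, pvRng L w) (hs : s < L) :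
    ∀ {v k}, pvWalk g L s v k → v < L := by
  intro v k h
  induction h with
  | zero => exact hs
  | step hw hm ih => exact pvNrm_lt (hAdj _ ih _ hm)

def pvGood (g : List (List Int)) (L : Nat) (s : Nat) (D : Nat → Int) : Prop :=
  ∀ v, v < L →
    (0 ≤ D v ∧ D v ≤ pvINF) ∧
    (D v < pvINF → pvWalk g L s v (D v).toNat) ∧
    (∀ k, pvWalk g L s v k → D v ≤ (k : Int))

theorem pvChain {g : List (List Int)} {L : Nat} {s : Nat} {D : Nat → Int}
    (hAdj : ∀ v, v < L → ∀ w ∈ pvAdj g v, pvRng L w) (hs : s < L)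
    (hb : ∀ v, v < L → 0 ≤ D v ∧ D v ≤ pvINF)
    (h0 : D s = 0)
    (hcl : ∀ v, v < L → D v < pvINF → ∀ w ∈ pvAdj g v, D (pvNrm L w) ≤ D v + 1) :
    ∀ {v k}, pvWalk g L s v k → D v ≤ (k : Int) := by
  intro v k h
  induction h with
  | zero => simp [h0]
  | @step v' k' w hw hm ih =>
    have hv' : v' < L := pvWalk_lt hAdj hs hw
    have hw' : pvNrm L w < L := pvNrm_lt (hAdj _ hv' _ hm)
    by_cases hfin : D v' < pvINF
    · have := hcl v' hv' hfin w hm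
      push_cast
      omega
    · have h1 : D v' = pvINF := le_antisymm (hb v' hv').2 (by omega)
      have h2 : D (pvNrm L w) ≤ pvINF := (hb _ hw').2
      push_cast
      omega

theorem pvGood_unique {g : List (List Int)} {L : Nat} {s : Nat} {D1 D2 : Nat → Int}
    (h1 : pvGood g L s D1) (h2 : pvGood g L s D2) : ∀ v, v < L → D1 v = D2 v := by
  have key : ∀ (A B : Nat → Int), pvGood g L s A → pvGood g L s B →
      ∀ v, v < L → A v ≤ B v := by
    intro A B hA hB v hv
    by_cases hfin : B v < pvINF
    · have hw := (hB v hv).2.1 hfin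
      have := (hA v hv).2.2 _ hw
      have hBnn := (hB v hv).1.1
      omega
    · have := (hA v hv).1.2
      omega
  exact fun v hv => le_antisymm (key D1 D2 h1 h2 v hv) (key D2 D1 h2 h1 v hv)
-- ---- Dijkstra loop invariant and the neighbour-relaxation fold ----

structure pvDInv (g : List (List Int)) (L : Nat) (s : Nat)
    (dist : List Int) (q : List (Int × Int)) : Prop where
  len : dist.length = L
  src : pvD dist s = 0
  bounds : ∀ v, v < L → 0 ≤ pvD dist v ∧ pvD dist v ≤ pvINF
  sound : ∀ v, v < L → pvD dist v < pvINF → pvWalk g L s v (pvD dist v).toNat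
  qrng : ∀ p ∈ q, 0 ≤ p.1 ∧ pvRng L p.2
  qsound : ∀ p ∈ q, pvWalk g L s (pvNrm L p.2) p.1.toNat ∧ pvD dist (pvNrm L p.2) ≤ p.1
  closed : ∀ v, v < L → pvD dist v < pvINF →
    (∃ p ∈ q, pvNrm L p.2 = v ∧ p.1 = pvD dist v) ∨
    (∀ w ∈ pvAdj g v, pvD dist (pvNrm L w) ≤ pvD dist v + 1)

theorem pvRelax {L : Nat} {d : Int} :
    ∀ (ws : List Int), (∀ w ∈ ws, pvRng L w) →
    ∀ (dist : List Int) (q : List (Int × Int)), dist.length = L →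
     (let r := ws.foldl (fun (s : List Int × List (Int × Int)) i =>
        if d + 1 < pvGetI s.1 i then (PySem.List.pySetD s.1 i (d + 1), s.2 ++ [(d + 1, i)])
        else s) (dist, q)
      r.1.length = L ∧
      (∀ v, v < L → pvD r.1 v ≤ pvD dist v ∧ (pvD r.1 v = pvD dist v ∨ pvD r.1 v = d + 1)) ∧
      (∃ new : List (Int × Int), r.2 = q ++ new ∧ new.length ≤ ws.length ∧
         (∀ p ∈ new, p.1 = d + 1 ∧ p.2 ∈ ws) ∧
         pvSum r.1 L + new.length ≤ pvSum dist L) ∧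
      (∀ w ∈ ws, pvD r.1 (pvNrm L w) ≤ d + 1) ∧
      (∀ v, v < L → pvD r.1 v < pvD dist v →
         pvD r.1 v = d + 1 ∧ (∃ w ∈ ws, pvNrm L w = v) ∧
           ∃ p ∈ r.2, pvNrm L p.2 = v ∧ p.1 = d + 1)) := by
  intro ws
  induction ws with
  | nil =>
    intro _ dist q hlen
    refine ⟨hlen, fun v _ => ⟨le_refl _, Or.inl rfl⟩,
      ⟨[], by simp, by simp, by simp, by simp⟩, by simp, fun v _ hlt => absurd hlt (by simp)⟩
  | cons w ws ih =>
    intro hrng dist q hlen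
    have hrw : pvRng L w := hrng w (by simp)
    have hnw : pvNrm L w < L := pvNrm_lt hrw
    simp only [List.foldl_cons]
    by_cases hc : d + 1 < pvGetI dist w
    · rw [if_pos hc]
      rw [pvGetI_eq hlen hrw] at hc
      set dist1 := PySem.List.pySetD dist w (d + 1) with hdist1
      have hset : dist1 = dist.set (pvNrm L w) (d + 1) := pvSetD_eq hlen hrw
      have hlen1 : dist1.length = L := by rw [hset]; simp [hlen]
      have hD1 : ∀ v, pvD dist1 v = if v = pvNrm L w then d + 1 else pvD dist v := by
        intro v; rw [hset, pvD_set (by omega)]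
      obtain ⟨rlen, rmono, ⟨new, rq, rnlen, rnmem, rsum⟩, rws, rchg⟩ :=
        ih (fun w' hw' => hrng w' (by simp [hw'])) dist1 (q ++ [(d + 1, w)]) hlen1
      set r := ws.foldl (fun (s : List Int × List (Int × Int)) i =>
        if d + 1 < pvGetI s.1 i then (PySem.List.pySetD s.1 i (d + 1), s.2 ++ [(d + 1, i)])
        else s) (dist1, q ++ [(d + 1, w)]) with hr
      have hmono1 : ∀ v, v < L → pvD dist1 v ≤ pvD dist v := by
        intro v hv; rw [hD1]; split
        · subst v; omega
        · omega
      refine ⟨rlen, ?_, ?_, ?_, ?_⟩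
      · intro v hv
        refine ⟨le_trans (rmono v hv).1 (hmono1 v hv), ?_⟩
        rcases (rmono v hv).2 with h | h
        · rw [h, hD1]; split
          · exact Or.inr rfl
          · exact Or.inl rfl
        · exact Or.inr h
      · refine ⟨(d + 1, w) :: new, by rw [rq]; simp, by simp; omega, ?_, ?_⟩
        · intro p hp
          rcases List.mem_cons.1 hp with h | h
          · subst h; exact ⟨rfl, by simp⟩
          · exact ⟨(rnmem p h).1, by simp [(rnmem p h).2]⟩
        · have h1 : pvSum dist1 L = pvSum dist L - pvD dist (pvNrm L w) + (d + 1) := by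
            rw [hset, pvSum_set hnw (by omega)]
          simp only [List.length_cons]
          push_cast
          omega
      · intro w' hw'
        rcases List.mem_cons.1 hw' with h | h
        · rw [h]
          have := (rmono (pvNrm L w) hnw).1
          rw [hD1 (pvNrm L w), if_pos rfl] at this
          exact this
        · exact rws w' h
      · intro v hv hlt
        by_cases hch : pvD r.1 v < pvD dist1 v
        · obtain ⟨e1, ⟨w', hw', he⟩, e3⟩ := rchg v hv hch
          exact ⟨e1, ⟨w', by simp [hw'], he⟩, e3⟩
        · have heq : pvD r.1 v = pvD dist1 v := le_antisymm (rmono v hv).1 (by omega)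
          have hvw : v = pvNrm L w := by
            by_contra hne
            rw [heq, hD1, if_neg hne] at hlt
            omega
          subst hvw
          refine ⟨by rw [heq, hD1, if_pos rfl], ⟨w, by simp, rfl⟩,
            ⟨(d + 1, w), ?_, rfl, rfl⟩⟩
          rw [rq]
          simp
    · rw [if_neg hc]
      obtain ⟨rlen, rmono, ⟨new, rq, rnlen, rnmem, rsum⟩, rws, rchg⟩ :=
        ih (fun w' hw' => hrng w' (by simp [hw'])) dist q hlen
      refine ⟨rlen, rmono, ⟨new, rq, le_trans rnlen (by simp),
        fun p hp => ⟨(rnmem p hp).1, by simp [(rnmem p hp).2]⟩, rsum⟩, ?_, ?_⟩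
      · intro w' hw'
        rcases List.mem_cons.1 hw' with h | h
        · rw [h]
          rw [pvGetI_eq hlen hrw] at hc
          exact le_trans (rmono _ (pvNrm_lt hrw)).1 (by omega)
        · exact rws w' h
      · intro v hv hlt
        obtain ⟨e1, ⟨w', hw', he⟩, e3⟩ := rchg v hv hlt
        exact ⟨e1, ⟨w', by simp [hw'], he⟩, e3⟩
-- ---- Dijkstra main loop: the final array satisfies the characterisation ----

theorem pvAdjLen_lt {g : List (List Int)} {L v : Nat} (hgl : g.length = L) (hv : v < L) :
    (pvAdj g v).length + 1 ≤ (g.map List.length).sum + 1 := by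
  have : (pvAdj g v).length ∈ g.map List.length :=
    List.mem_map.2 ⟨pvAdj g v, pvAdj_mem (by omega), rfl⟩
  have := List.le_sum_of_mem this
  omega

theorem pvDijLoop_good {g : List (List Int)} {L s : Nat}
    (hgl : g.length = L) (hAdj : ∀ v, v < L → ∀ w ∈ pvAdj g v, pvRng L w) (hs : s < L) :
    ∀ (fuel : Nat) (dist : List Int) (q : List (Int × Int)),
      pvDInv g L s dist q →
      (pvSum dist L).toNat * ((g.map List.length).sum + 1) + q.length < fuel →
      (pvDijLoop g fuel dist q).length = L ∧ pvGood g L s (pvD (pvDijLoop g fuel dist q)) := by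
  intro fuel
  induction fuel with
  | zero => intro dist q _ hm; omega
  | succ fuel ih =>
    intro dist q inv hm
    rcases hpm : pvPopMin q with _ | ⟨p, q'⟩
    · have hq : q = [] := pvPopMin_eq_none.1 hpm
      have hred : pvDijLoop g (fuel + 1) dist q = dist := by
        simp only [pvDijLoop, hpm]
      rw [hred]
      refine ⟨inv.len, fun v hv => ⟨inv.bounds v hv, inv.sound v hv, fun k hk => ?_⟩⟩
      refine pvChain hAdj hs inv.bounds inv.src ?_ hk
      intro v' hv' hfin w hw
      rcases inv.closed v' hv' hfin with ⟨x, hx, _⟩ | h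
      · rw [hq] at hx; simp at hx
      · exact h w hw
    · have hperm : q.Perm (p :: q') := pvPopMin_perm hpm
      have hmemq : ∀ x, x ∈ p :: q' → x ∈ q := fun x hx => hperm.symm.subset hx
      have hmemq' : ∀ x, x ∈ q → x = p ∨ x ∈ q' := by
        intro x hx
        rcases List.mem_cons.1 (hperm.subset hx) with h | h
        · exact Or.inl h
        · exact Or.inr h
      have hpq : p ∈ q := hmemq p (by simp)
      have hqlen : q.length = q'.length + 1 := by rw [hperm.length_eq]; simp
      have hrngp := inv.qrng p hpq
      have hnp : pvNrm L p.2 < L := pvNrm_lt hrngp.2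
      have hgetw : pvGetI dist p.2 = pvD dist (pvNrm L p.2) := pvGetI_eq inv.len hrngp.2
      by_cases hstale : pvGetI dist p.2 < p.1
      · have hred : pvDijLoop g (fuel + 1) dist q = pvDijLoop g fuel dist q' := by
          simp only [pvDijLoop, hpm, if_pos hstale]
        rw [hred]
        apply ih
        · refine ⟨inv.len, inv.src, inv.bounds, inv.sound,
            fun x hx => inv.qrng x (hmemq x (by simp [hx])),
            fun x hx => inv.qsound x (hmemq x (by simp [hx])), ?_⟩
          intro v hv hfin
          rcases inv.closed v hv hfin with ⟨x, hx, hx1, hx2⟩ | h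
          · left
            rcases hmemq' x hx with hx' | hx'
            · exfalso
              subst hx'
              rw [hgetw, hx1, ← hx2] at hstale
              omega
            · exact ⟨x, hx', hx1, hx2⟩
          · right; exact h
        · omega
      · have hdle := (inv.qsound p hpq).2
        have hdval : pvD dist (pvNrm L p.2) = p.1 := by omega
        have hwalkp : pvWalk g L s (pvNrm L p.2) p.1.toNat := by
          have := (inv.qsound p hpq).1
          exact this
      
        have hws : pvGetL g p.2 = pvAdj g (pvNrm L p.2) := pvGetL_eq hgl hrngp.2
        have hrngws : ∀ w ∈ pvGetL g p.2, pvRng L w := by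
          rw [hws]; exact hAdj _ hnp
        obtain ⟨rlen, rmono, ⟨new, rq, rnlen, rnmem, rsum⟩, rws, rchg⟩ :=
          pvRelax (L := L) (d := p.1) (pvGetL g p.2) hrngws dist q' inv.len
        set r := (pvGetL g p.2).foldl
          (fun (s : List Int × List (Int × Int)) i =>
            if p.1 + 1 < pvGetI s.1 i then (PySem.List.pySetD s.1 i (p.1 + 1), s.2 ++ [(p.1 + 1, i)])
            else s) (dist, q') with hr
        have hred : pvDijLoop g (fuel + 1) dist q = pvDijLoop g fuel r.1 r.2 := by
          simp only [pvDijLoop, hpm, if_neg hstale]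
          rw [hr]
        rw [hred]
        have hd0 : 0 ≤ p.1 := hrngp.1
        have htn : (p.1 + 1).toNat = p.1.toNat + 1 := by omega
        -- walk for every newly pushed entry
        have hwalknew : ∀ x ∈ new, pvWalk g L s (pvNrm L x.2) (p.1 + 1).toNat := by
          intro x hx
          have hx2 : x.2 ∈ pvAdj g (pvNrm L p.2) := by rw [← hws]; exact (rnmem x hx).2
          rw [htn]
          exact pvWalk.step hwalkp hx2
        -- changed slots keep a walk
        have hsound' : ∀ v, v < L → pvD r.1 v < pvINF → pvWalk g L s v (pvD r.1 v).toNat := by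
          intro v hv hfin
          by_cases hch : pvD r.1 v < pvD dist v
          · obtain ⟨he1, ⟨w, hwmem, hwnrm⟩, _⟩ := rchg v hv hch
            rw [he1, htn]
            have : w ∈ pvAdj g (pvNrm L p.2) := by rw [← hws]; exact hwmem
            rw [← hwnrm]
            exact pvWalk.step hwalkp this
          · have heq : pvD r.1 v = pvD dist v := le_antisymm (rmono v hv).1 (by omega)
            rw [heq]
            exact inv.sound v hv (by omega)
        refine ih r.1 r.2 ⟨rlen, ?_, ?_, hsound', ?_, ?_, ?_⟩ ?_
        · -- src
          have h1 := (rmono s hs).1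
          have h2 := (rmono s hs).2
          have := inv.src
          rcases h2 with h2 | h2 <;> omega
        · -- bounds
          intro v hv
          have h1 := (rmono v hv).1
          have h2 := (rmono v hv).2
          have hb := inv.bounds v hv
          rcases h2 with h2 | h2 <;> omega
        · -- qrng
          intro x hx
          rw [rq] at hx
          rcases List.mem_append.1 hx with hx' | hx'
          · exact inv.qrng x (hmemq x (by simp [hx']))
          · obtain ⟨hx1, hx2⟩ := rnmem x hx'
            exact ⟨by omega, hrngws x.2 hx2⟩
        · -- qsound
          intro x hx
          rw [rq] at hx
          rcases List.mem_append.1 hx with hx' | hx'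
          · obtain ⟨hw, hle⟩ := inv.qsound x (hmemq x (by simp [hx']))
            exact ⟨hw, le_trans (rmono _ (pvNrm_lt (inv.qrng x (hmemq x (by simp [hx']))).2)).1 hle⟩
          · obtain ⟨hx1, hx2⟩ := rnmem x hx'
            refine ⟨by rw [hx1]; exact hwalknew x hx', ?_⟩
            rw [hx1]
            exact rws x.2 hx2
        · -- closed
          intro v hv hfin
          by_cases hch : pvD r.1 v < pvD dist v
          · obtain ⟨he1, _, hx, hxmem, hxnrm, hx1⟩ := rchg v hv hch
            exact Or.inl ⟨hx, hxmem, hxnrm, by omega⟩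
          · have heq : pvD r.1 v = pvD dist v := le_antisymm (rmono v hv).1 (by omega)
            by_cases hvp : v = pvNrm L p.2
            · right
              intro w hw
              have hwle : pvD r.1 (pvNrm L w) ≤ p.1 + 1 := by
                apply rws
                rw [hws, hvp] at *
                exact hw
              rw [heq, hvp, hdval]
              exact hwle
            · rcases inv.closed v hv (by omega) with ⟨x, hx, hx1, hx2⟩ | h
              · rcases hmemq' x hx with hx' | hx'
                · exfalso; rw [hx'] at hx1; exact hvp hx1.symm
                · left
                  refine ⟨x, by rw [rq]; exact List.mem_append_left _ hx', hx1, by omega⟩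
              · right
                intro w hw
                have hwr : pvRng L w := hAdj v hv w hw
                calc pvD r.1 (pvNrm L w) ≤ pvD dist (pvNrm L w) := (rmono _ (pvNrm_lt hwr)).1
                  _ ≤ pvD dist v + 1 := h w hw
                  _ = pvD r.1 v + 1 := by omega
        · -- measure decreases
          have hrlen2 : r.2.length = q'.length + new.length := by rw [rq]; simp
          have hS0 : 0 ≤ pvSum r.1 L := by
            apply pvSum_nonneg
            intro v hv
            have h1 := (rmono v hv).2
            have hb := (inv.bounds v hv).1
            rcases h1 with h1 | h1 <;> omega
          have hkws : new.length + 1 ≤ (g.map List.length).sum + 1 := by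
            have h1 : (pvGetL g p.2).length + 1 ≤ (g.map List.length).sum + 1 := by
              rw [hws]; exact pvAdjLen_lt hgl hnp
            omega
          set C := (g.map List.length).sum + 1 with hC
          set k := new.length with hk
          have h1 : (pvSum r.1 L).toNat + k ≤ (pvSum dist L).toNat := by omega
          have h2 : ((pvSum r.1 L).toNat + k) * C ≤ (pvSum dist L).toNat * C :=
            Nat.mul_le_mul_right C h1
          rw [Nat.add_mul] at h2
          have h3 : k ≤ k * C := Nat.le_mul_of_pos_right k (by omega)
          omega
-- ---- pvDijkstra meets the characterisation ----

theorem pvD_replicate {L v : Nat} (hv : v < L) : pvD (List.replicate L pvINF) v = pvINF := by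
  simp [pvD, List.getD, hv]

theorem pvDeg_aux (g : List (List Int)) : ∀ (a : Nat),
    g.foldl (fun a l => a + l.length) a = a + (g.map List.length).sum := by
  induction g with
  | nil => simp
  | cons l g ih => intro a; simp [List.foldl_cons, ih]; omega

theorem pvDeg_eq (g : List (List Int)) : pvDeg g = (g.map List.length).sum := by
  unfold pvDeg
  rw [pvDeg_aux]
  omega

theorem pvDijkstra_good {n : Int} {g : List (List Int)} {s : Int}
    (hn : 1 ≤ n) (hg : pvGraphOK g (n + 1).toNat) (hs1 : 1 ≤ s) (hs2 : s ≤ n) :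
    (pvDijkstra s (List.replicate (n + 1).toNat pvINF) g).length = (n + 1).toNat ∧
    pvGood g (n + 1).toNat s.toNat (pvD (pvDijkstra s (List.replicate (n + 1).toNat pvINF) g)) := by
  obtain ⟨hgl, hAdj⟩ := hg
  set L := (n + 1).toNat with hL
  have hLI : (L : Int) = n + 1 := by omega
  have hrs : pvRng L s := ⟨by omega, by omega⟩
  have hsn : pvNrm L s = s.toNat := pvNrm_of_nonneg (by omega)
  have hsL : s.toNat < L := by omega
  have hset : PySem.List.pySetD (List.replicate L pvINF) s 0
      = (List.replicate L pvINF).set s.toNat 0 := by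
    rw [pvSetD_eq (by simp) hrs, hsn]
  have hD0 : ∀ v, v < L → pvD (PySem.List.pySetD (List.replicate L pvINF) s 0) v
      = if v = s.toNat then 0 else pvINF := by
    intro v hv
    rw [hset, pvD_set (by simp; omega)]
    by_cases h : v = s.toNat
    · simp [h]
    · simp [h, pvD_replicate hv]
  have hINFpos : (0 : Int) < pvINF := by decide
  set dist0 := PySem.List.pySetD (List.replicate L pvINF) s 0 with hdist0
  have inv : pvDInv g L s.toNat dist0 [(0, s)] := by
    refine ⟨by rw [hset]; simp, ?_, ?_, ?_, ?_, ?_, ?_⟩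
    · rw [hD0 _ hsL]; simp
    · intro v hv; rw [hD0 v hv]; split <;> omega
    · intro v hv hfin
      rw [hD0 v hv] at *
      by_cases h : v = s.toNat
      · rw [if_pos h]
        simp only [Int.toNat_zero]
        rw [h]
        exact pvWalk.zero
      · rw [if_neg h] at hfin; omega
    · intro x hx; simp at hx; subst hx; exact ⟨le_refl _, hrs⟩
    · intro x hx
      simp at hx
      subst hx
      simp only [hsn]
      refine ⟨by simpa using pvWalk.zero, ?_⟩
      rw [hD0 _ hsL]; simp
    · intro v hv hfin
      have hveq : v = s.toNat := by
        by_contra h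
        rw [hD0 v hv, if_neg h] at hfin
        omega
      left
      refine ⟨(0, s), by simp, by simp [hsn, hveq], ?_⟩
      rw [hD0 v hv, if_pos hveq]
  have hfuel : (pvSum dist0 L).toNat * ((g.map List.length).sum + 1) + 1
      < (List.replicate L pvINF).length * pvINF.toNat * (pvDeg g + 1) + 2 := by
    rw [pvDeg_eq]
    have hb : pvSum dist0 L ≤ (L : Int) * pvINF := by
      apply pvSum_le
      intro v hv; rw [hD0 v hv]; split <;> omega
    have hcast : ((L * pvINF.toNat : Nat) : Int) = (L : Int) * pvINF := by
      push_cast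
      have : ((pvINF.toNat : Nat) : Int) = pvINF := by decide
      rw [this]
    have h1 : (pvSum dist0 L).toNat ≤ L * pvINF.toNat := by omega
    have h2 : (pvSum dist0 L).toNat * ((g.map List.length).sum + 1)
        ≤ (L * pvINF.toNat) * ((g.map List.length).sum + 1) :=
      Nat.mul_le_mul_right _ h1
    simp only [List.length_replicate]
    omega
  exact pvDijLoop_good hgl hAdj hsL _ dist0 [(0, s)] inv hfuel
-- ---- BFS loop invariant, one frontier-node expansion, one round ----

structure pvBInv (g : List (List Int)) (L : Nat) (s : Nat)
    (dist : List Int) (frontier : List Int) (d : Int) : Prop where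
  len : dist.length = L
  src : pvD dist s = 0
  dnn : 0 ≤ d
  bounds : ∀ v, v < L → 0 ≤ pvD dist v ∧ pvD dist v ≤ pvINF
  sound : ∀ v, v < L → pvD dist v < pvINF → pvWalk g L s v (pvD dist v).toNat
  finle : ∀ v, v < L → pvD dist v < pvINF → pvD dist v ≤ d
  frng : ∀ w ∈ frontier, pvRng L w
  fval : ∀ w ∈ frontier, pvD dist (pvNrm L w) = d
  fwalk : ∀ w ∈ frontier, pvWalk g L s (pvNrm L w) d.toNat
  closed : ∀ v, v < L → pvD dist v < pvINF →
    (∃ w ∈ frontier, pvNrm L w = v) ∨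
    (∀ w ∈ pvAdj g v, pvD dist (pvNrm L w) ≤ pvD dist v + 1)

-- expanding the neighbour list of one frontier node
theorem pvBRelax {L : Nat} {d : Int} :
    ∀ (ws : List Int), (∀ w ∈ ws, pvRng L w) →
    ∀ (dist : List Int) (nxt : List Int), dist.length = L →
     (let r := ws.foldl (fun (s : List Int × List Int) w =>
        if d + 1 < pvGetI s.1 w then (PySem.List.pySetD s.1 w (d + 1), s.2 ++ [w])
        else s) (dist, nxt)
      r.1.length = L ∧
      (∀ v, v < L → pvD r.1 v ≤ pvD dist v ∧ (pvD r.1 v = pvD dist v ∨ pvD r.1 v = d + 1)) ∧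
      (∃ new : List Int, r.2 = nxt ++ new ∧
         (∀ w ∈ new, w ∈ ws ∧ pvD r.1 (pvNrm L w) = d + 1) ∧
         pvSum r.1 L + new.length ≤ pvSum dist L) ∧
      (∀ w ∈ ws, pvD r.1 (pvNrm L w) ≤ d + 1) ∧
      (∀ v, v < L → pvD r.1 v < pvD dist v →
         pvD r.1 v = d + 1 ∧ ∃ w ∈ ws, pvNrm L w = v ∧ w ∈ r.2)) := by
  intro ws
  induction ws with
  | nil =>
    intro _ dist nxt hlen
    refine ⟨hlen, fun v _ => ⟨le_refl _, Or.inl rfl⟩,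
      ⟨[], by simp, by simp, by simp⟩, by simp, fun v _ hlt => absurd hlt (by simp)⟩
  | cons w ws ih =>
    intro hrng dist nxt hlen
    have hrw : pvRng L w := hrng w (by simp)
    have hnw : pvNrm L w < L := pvNrm_lt hrw
    simp only [List.foldl_cons]
    by_cases hc : d + 1 < pvGetI dist w
    · rw [if_pos hc]
      rw [pvGetI_eq hlen hrw] at hc
      set dist1 := PySem.List.pySetD dist w (d + 1) with hdist1
      have hset : dist1 = dist.set (pvNrm L w) (d + 1) := pvSetD_eq hlen hrw
      have hlen1 : dist1.length = L := by rw [hset]; simp [hlen]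
      have hD1 : ∀ v, pvD dist1 v = if v = pvNrm L w then d + 1 else pvD dist v := by
        intro v; rw [hset, pvD_set (by omega)]
      obtain ⟨rlen, rmono, ⟨new, rq, rnmem, rsum⟩, rws, rchg⟩ :=
        ih (fun w' hw' => hrng w' (by simp [hw'])) dist1 (nxt ++ [w]) hlen1
      set r := ws.foldl (fun (s : List Int × List Int) w =>
        if d + 1 < pvGetI s.1 w then (PySem.List.pySetD s.1 w (d + 1), s.2 ++ [w])
        else s) (dist1, nxt ++ [w]) with hr
      have hmono1 : ∀ v, v < L → pvD dist1 v ≤ pvD dist v := by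
        intro v hv; rw [hD1]; split
        · subst v; omega
        · omega
      refine ⟨rlen, ?_, ?_, ?_, ?_⟩
      · intro v hv
        refine ⟨le_trans (rmono v hv).1 (hmono1 v hv), ?_⟩
        rcases (rmono v hv).2 with h | h
        · rw [h, hD1]; split
          · exact Or.inr rfl
          · exact Or.inl rfl
        · exact Or.inr h
      · refine ⟨w :: new, by rw [rq]; simp, ?_, ?_⟩
        · intro x hx
          rcases List.mem_cons.1 hx with h | h
          · subst h
            refine ⟨by simp, ?_⟩
            have h1 := (rmono (pvNrm L x) hnw).1
            have h2 := (rmono (pvNrm L x) hnw).2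
            rw [hD1 (pvNrm L x), if_pos rfl] at h1 h2
            rcases h2 with h2 | h2 <;> omega
          · obtain ⟨hm1, hm2⟩ := rnmem x h
            exact ⟨by simp [hm1], hm2⟩
        · have h1 : pvSum dist1 L = pvSum dist L - pvD dist (pvNrm L w) + (d + 1) := by
            rw [hset, pvSum_set hnw (by omega)]
          simp only [List.length_cons]
          push_cast
          omega
      · intro w' hw'
        rcases List.mem_cons.1 hw' with h | h
        · rw [h]
          have := (rmono (pvNrm L w) hnw).1
          rw [hD1 (pvNrm L w), if_pos rfl] at this
          exact this
        · exact rws w' h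
      · intro v hv hlt
        by_cases hch : pvD r.1 v < pvD dist1 v
        · obtain ⟨e1, w', hw', he, hm⟩ := rchg v hv hch
          exact ⟨e1, w', by simp [hw'], he, hm⟩
        · have heq : pvD r.1 v = pvD dist1 v := le_antisymm (rmono v hv).1 (by omega)
          have hvw : v = pvNrm L w := by
            by_contra hne
            rw [heq, hD1, if_neg hne] at hlt
            omega
          subst hvw
          refine ⟨by rw [heq, hD1, if_pos rfl], w, by simp, rfl, ?_⟩
          rw [rq]
          simp
    · rw [if_neg hc]
      obtain ⟨rlen, rmono, ⟨new, rq, rnmem, rsum⟩, rws, rchg⟩ :=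
        ih (fun w' hw' => hrng w' (by simp [hw'])) dist nxt hlen
      refine ⟨rlen, rmono, ⟨new, rq,
        fun x hx => ⟨by simp [(rnmem x hx).1], (rnmem x hx).2⟩, rsum⟩, ?_, ?_⟩
      · intro w' hw'
        rcases List.mem_cons.1 hw' with h | h
        · rw [h]
          rw [pvGetI_eq hlen hrw] at hc
          exact le_trans (rmono _ (pvNrm_lt hrw)).1 (by omega)
        · exact rws w' h
      · intro v hv hlt
        obtain ⟨e1, w', hw', he, hm⟩ := rchg v hv hlt
        exact ⟨e1, w', by simp [hw'], he, hm⟩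
-- ---- one BFS round (whole frontier) ----

theorem pvBRound {g : List (List Int)} {L s : Nat} {d : Int}
    (hgl : g.length = L) (hAdj : ∀ v, v < L → ∀ w ∈ pvAdj g v, pvRng L w) (hd : 0 ≤ d) :
    ∀ (F : List Int), (∀ v ∈ F, pvRng L v ∧ pvWalk g L s (pvNrm L v) d.toNat) →
    ∀ (dist : List Int) (nxt : List Int), dist.length = L →
      (∀ v ∈ F, pvD dist (pvNrm L v) = d) →
      (∀ w ∈ nxt, pvRng L w ∧ pvD dist (pvNrm L w) = d + 1 ∧
        pvWalk g L s (pvNrm L w) (d + 1).toNat) →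
     (let r := F.foldl (fun (s : List Int × List Int) v =>
        (pvGetL g v).foldl (fun (s : List Int × List Int) w =>
          if d + 1 < pvGetI s.1 w then (PySem.List.pySetD s.1 w (d + 1), s.2 ++ [w])
          else s) s) (dist, nxt)
      r.1.length = L ∧
      (∀ v, v < L → pvD r.1 v ≤ pvD dist v ∧ (pvD r.1 v = pvD dist v ∨ pvD r.1 v = d + 1)) ∧
      (∃ new : List Int, r.2 = nxt ++ new ∧ pvSum r.1 L + new.length ≤ pvSum dist L) ∧
      (∀ w ∈ r.2, pvRng L w ∧ pvD r.1 (pvNrm L w) = d + 1 ∧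
        pvWalk g L s (pvNrm L w) (d + 1).toNat) ∧
      (∀ v ∈ F, ∀ w ∈ pvAdj g (pvNrm L v), pvD r.1 (pvNrm L w) ≤ d + 1) ∧
      (∀ v, v < L → pvD r.1 v < pvD dist v → pvD r.1 v = d + 1 ∧ ∃ w ∈ r.2, pvNrm L w = v)) := by
  intro F
  induction F with
  | nil =>
    intro _ dist nxt hlen _ hnxt
    exact ⟨hlen, fun v _ => ⟨le_refl _, Or.inl rfl⟩, ⟨[], by simp, by simp⟩, hnxt,
      by simp, fun v _ hlt => absurd hlt (by simp)⟩
  | cons v F ih =>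
    intro hF dist nxt hlen hFval hnxt
    obtain ⟨hrv, hwv⟩ := hF v (by simp)
    have hnv : pvNrm L v < L := pvNrm_lt hrv
    have hws : pvGetL g v = pvAdj g (pvNrm L v) := pvGetL_eq hgl hrv
    have hrngws : ∀ w ∈ pvGetL g v, pvRng L w := by rw [hws]; exact hAdj _ hnv
    simp only [List.foldl_cons]
    obtain ⟨rlen1, rmono1, ⟨new1, rq1, rnmem1, rsum1⟩, rws1, rchg1⟩ :=
      pvBRelax (L := L) (d := d) (pvGetL g v) hrngws dist nxt hlen
    set r1 := (pvGetL g v).foldl (fun (s : List Int × List Int) w =>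
      if d + 1 < pvGetI s.1 w then (PySem.List.pySetD s.1 w (d + 1), s.2 ++ [w])
      else s) (dist, nxt) with hr1
    have htn : (d + 1).toNat = d.toNat + 1 := by omega
    have hnxt1 : ∀ w ∈ r1.2, pvRng L w ∧ pvD r1.1 (pvNrm L w) = d + 1 ∧
        pvWalk g L s (pvNrm L w) (d + 1).toNat := by
      intro w hw
      rw [rq1] at hw
      rcases List.mem_append.1 hw with hw' | hw'
      · obtain ⟨h1, h2, h3⟩ := hnxt w hw'
        have hm := (rmono1 _ (pvNrm_lt h1)).1
        have hm2 := (rmono1 _ (pvNrm_lt h1)).2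
        exact ⟨h1, by omega, h3⟩
      · obtain ⟨hm1, hm2⟩ := rnmem1 w hw'
        have hr : pvRng L w := hrngws w hm1
        refine ⟨hr, hm2, ?_⟩
        rw [htn]
        exact pvWalk.step hwv (by rw [← hws]; exact hm1)
    obtain ⟨rlen, rmono, ⟨new2, rq2, rsum2⟩, rnxt, rcl, rchg⟩ :=
      ih (fun v' hv' => hF v' (by simp [hv'])) r1.1 r1.2 rlen1
        (by
          intro v' hv'
          have hv'm := hF v' (by simp [hv'])
          have hlt := pvNrm_lt hv'm.1
          have h1 := (rmono1 _ hlt).1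
          have h2 := (rmono1 _ hlt).2
          have := hFval v' (by simp [hv'])
          rcases h2 with h2 | h2 <;> omega)
        hnxt1
    simp only [Prod.mk.eta] at rlen rmono rq2 rsum2 rnxt rcl rchg
    refine ⟨rlen, ?_, ?_, rnxt, ?_, ?_⟩
    · intro u hu
      refine ⟨le_trans (rmono u hu).1 (rmono1 u hu).1, ?_⟩
      rcases (rmono u hu).2 with h | h
      · rw [h]; exact (rmono1 u hu).2
      · exact Or.inr h
    · refine ⟨new1 ++ new2, by rw [rq2, rq1]; simp, ?_⟩
      simp only [List.length_append]
      push_cast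
      omega
    · intro v' hv' w hw
      rcases List.mem_cons.1 hv' with h | h
      · subst h
        have h1 : pvD r1.1 (pvNrm L w) ≤ d + 1 := rws1 w (by rw [hws]; exact hw)
        have hrw : pvRng L w := hAdj _ hnv w hw
        exact le_trans (rmono _ (pvNrm_lt hrw)).1 h1
      · exact rcl v' h w hw
    · intro u hu hlt
      by_cases hch : pvD (F.foldl (fun (s : List Int × List Int) v =>
        (pvGetL g v).foldl (fun (s : List Int × List Int) w =>
          if d + 1 < pvGetI s.1 w then (PySem.List.pySetD s.1 w (d + 1), s.2 ++ [w])
          else s) s) r1).1 u < pvD r1.1 u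
      · exact rchg u hu hch
      · have heq := le_antisymm (rmono u hu).1 (by omega)
        have hch1 : pvD r1.1 u < pvD dist u := by omega
        obtain ⟨he1, w, hwm, hwnrm, hwmem⟩ := rchg1 u hu hch1
        refine ⟨by omega, w, ?_, hwnrm⟩
        rw [rq2]
        exact List.mem_append_left _ hwmem
-- ---- BFS main loop and wrapper ----

theorem pvBfsLoop_good {g : List (List Int)} {L s : Nat}
    (hgl : g.length = L) (hAdj : ∀ v, v < L → ∀ w ∈ pvAdj g v, pvRng L w) (hs : s < L) :
    ∀ (fuel : Nat) (dist : List Int) (frontier : List Int) (d : Int),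
      pvBInv g L s dist frontier d →
      2 * (pvSum dist L).toNat + (if frontier = [] then 0 else 1) < fuel →
      (pvBfsLoop g fuel dist frontier d).length = L ∧
        pvGood g L s (pvD (pvBfsLoop g fuel dist frontier d)) := by
  intro fuel
  induction fuel with
  | zero => intro dist frontier d _ hm; split at hm <;> omega
  | succ fuel ih =>
    intro dist frontier d inv hm
    by_cases hfe : frontier.isEmpty
    · have hred : pvBfsLoop g (fuel + 1) dist frontier d = dist := by
        simp [pvBfsLoop, hfe]
      rw [hred]
      have hfr : frontier = [] := List.isEmpty_iff.1 hfe
      refine ⟨inv.len, fun v hv => ⟨inv.bounds v hv, inv.sound v hv, fun k hk => ?_⟩⟩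
      refine pvChain hAdj hs inv.bounds inv.src ?_ hk
      intro v' hv' hfin w hw
      rcases inv.closed v' hv' hfin with ⟨x, hx, _⟩ | h
      · rw [hfr] at hx; simp at hx
      · exact h w hw
    · have hfr : frontier ≠ [] := by simpa [List.isEmpty_iff] using hfe
      obtain ⟨rlen, rmono, ⟨new, rq, rsum⟩, rnxt, rcl, rchg⟩ :=
        pvBRound hgl hAdj inv.dnn frontier (fun v hv => ⟨inv.frng v hv, inv.fwalk v hv⟩)
          dist [] inv.len (fun v hv => inv.fval v hv) (by simp)
      set r := frontier.foldl (fun (s : List Int × List Int) v =>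
        (pvGetL g v).foldl (fun (s : List Int × List Int) w =>
          if d + 1 < pvGetI s.1 w then (PySem.List.pySetD s.1 w (d + 1), s.2 ++ [w])
          else s) s) (dist, []) with hr
      have hred : pvBfsLoop g (fuel + 1) dist frontier d
          = pvBfsLoop g fuel r.1 r.2 (d + 1) := by
        simp only [pvBfsLoop]
        rw [if_neg hfe, hr]
      rw [hred]
      have hsum' : 0 ≤ pvSum r.1 L := by
        apply pvSum_nonneg
        intro v hv
        have h1 := (rmono v hv).2
        have hb := (inv.bounds v hv).1
        have hd := inv.dnn
        rcases h1 with h1 | h1 <;> omega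
      apply ih
      · refine ⟨rlen, ?_, by have := inv.dnn; omega, ?_, ?_, ?_,
          fun w hw => (rnxt w hw).1, fun w hw => (rnxt w hw).2.1,
          fun w hw => (rnxt w hw).2.2, ?_⟩
        · -- src
          have h1 := (rmono s hs).1
          have h2 := (rmono s hs).2
          have := inv.src
          have hd := inv.dnn
          rcases h2 with h2 | h2 <;> omega
        · -- bounds
          intro v hv
          have h1 := (rmono v hv).1
          have h2 := (rmono v hv).2
          have hb := inv.bounds v hv
          have hd := inv.dnn
          rcases h2 with h2 | h2 <;> omega
        · -- sound
          intro v hv hfin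
          by_cases hch : pvD r.1 v < pvD dist v
          · obtain ⟨he1, w, hwm, hwnrm⟩ := rchg v hv hch
            rw [← hwnrm, (rnxt w hwm).2.1]
            exact (rnxt w hwm).2.2
          · have heq : pvD r.1 v = pvD dist v := le_antisymm (rmono v hv).1 (by omega)
            rw [heq]
            exact inv.sound v hv (by omega)
        · -- finle
          intro v hv hfin
          by_cases hch : pvD r.1 v < pvD dist v
          · have := (rchg v hv hch).1; omega
          · have heq : pvD r.1 v = pvD dist v := le_antisymm (rmono v hv).1 (by omega)
            have := inv.finle v hv (by omega)
            omega
        · -- closed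
          intro v hv hfin
          by_cases hch : pvD r.1 v < pvD dist v
          · obtain ⟨he1, w, hwm, hwnrm⟩ := rchg v hv hch
            exact Or.inl ⟨w, hwm, hwnrm⟩
          · have heq : pvD r.1 v = pvD dist v := le_antisymm (rmono v hv).1 (by omega)
            rcases inv.closed v hv (by omega) with ⟨w, hwm, hwnrm⟩ | h
            · right
              intro u hu
              have h1 : pvD r.1 (pvNrm L u) ≤ d + 1 := by
                apply rcl w hwm
                rw [hwnrm]
                exact hu
              have h2 := inv.fval w hwm
              rw [hwnrm] at h2
              omega
            · right
              intro u hu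
              have hru : pvRng L u := hAdj v hv u hu
              calc pvD r.1 (pvNrm L u) ≤ pvD dist (pvNrm L u) := (rmono _ (pvNrm_lt hru)).1
                _ ≤ pvD dist v + 1 := h u hu
                _ = pvD r.1 v + 1 := by omega
      · -- measure
        have hrq : r.2 = new := by rw [rq]; simp
        rcases Decidable.em (new = []) with hne | hne
        · rw [hne] at rsum
          simp only [List.length_nil, Nat.cast_zero, add_zero] at rsum
          rw [hrq, hne, if_pos rfl]
          rw [if_neg hfr] at hm
          omega
        · rw [hrq, if_neg hne]
          rw [if_neg hfr] at hm
          have : 1 ≤ new.length := by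
            cases new with
            | nil => simp at hne
            | cons a l => simp
          omega

theorem pvBfs_good {n : Int} {g : List (List Int)} {s : Int}
    (hn : 1 ≤ n) (hg : pvGraphOK g (n + 1).toNat) (hs1 : 1 ≤ s) (hs2 : s ≤ n) :
    (pvBfs n g s).length = (n + 1).toNat ∧
    pvGood g (n + 1).toNat s.toNat (pvD (pvBfs n g s)) := by
  obtain ⟨hgl, hAdj⟩ := hg
  set L := (n + 1).toNat with hL
  have hLI : (L : Int) = n + 1 := by omega
  have hrs : pvRng L s := ⟨by omega, by omega⟩
  have hsn : pvNrm L s = s.toNat := pvNrm_of_nonneg (by omega)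
  have hsL : s.toNat < L := by omega
  have hset : PySem.List.pySetD (List.replicate L pvINF) s 0
      = (List.replicate L pvINF).set s.toNat 0 := by
    rw [pvSetD_eq (by simp) hrs, hsn]
  have hD0 : ∀ v, v < L → pvD (PySem.List.pySetD (List.replicate L pvINF) s 0) v
      = if v = s.toNat then 0 else pvINF := by
    intro v hv
    rw [hset, pvD_set (by simp; omega)]
    by_cases h : v = s.toNat
    · simp [h]
    · simp [h, pvD_replicate hv]
  have hINFpos : (0 : Int) < pvINF := by decide
  set dist0 := PySem.List.pySetD (List.replicate L pvINF) s 0 with hdist0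
  have inv : pvBInv g L s.toNat dist0 [s] 0 := by
    refine ⟨by rw [hset]; simp, by rw [hD0 _ hsL]; simp, le_refl 0, ?_, ?_, ?_, ?_, ?_, ?_, ?_⟩
    · intro v hv; rw [hD0 v hv]; split <;> omega
    · intro v hv hfin
      rw [hD0 v hv] at *
      by_cases h : v = s.toNat
      · rw [if_pos h]
        simp only [Int.toNat_zero]
        rw [h]
        exact pvWalk.zero
      · rw [if_neg h] at hfin; omega
    · intro v hv hfin
      rw [hD0 v hv] at *
      by_cases h : v = s.toNat
      · rw [if_pos h]
      · rw [if_neg h] at hfin; omega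
    · intro w hw; simp at hw; subst hw; exact hrs
    · intro w hw; simp at hw; subst hw; rw [hsn, hD0 _ hsL]; simp
    · intro w hw; simp at hw; subst hw; rw [hsn]; simpa using pvWalk.zero
    · intro v hv hfin
      have hveq : v = s.toNat := by
        by_contra h
        rw [hD0 v hv, if_neg h] at hfin
        omega
      exact Or.inl ⟨s, by simp, by rw [hsn, hveq]⟩
  have hfuel : 2 * (pvSum dist0 L).toNat + (if ([s] : List Int) = [] then 0 else 1)
      < 2 * L * pvINF.toNat + 2 := by
    have hb : pvSum dist0 L ≤ (L : Int) * pvINF := by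
      apply pvSum_le
      intro v hv; rw [hD0 v hv]; split <;> omega
    have hcast : ((L * pvINF.toNat : Nat) : Int) = (L : Int) * pvINF := by
      push_cast
      have : ((pvINF.toNat : Nat) : Int) = pvINF := by decide
      rw [this]
    have h1 : (pvSum dist0 L).toNat ≤ L * pvINF.toNat := by omega
    simp only [List.cons_ne_self]
    have h2 : 2 * L * pvINF.toNat = 2 * (L * pvINF.toNat) := by ring
    rw [if_neg (by simp)]
    omega
  exact pvBfsLoop_good hgl hAdj hsL _ dist0 [s] 0 inv hfuel

-- ---- the two distance arrays coincide ----

theorem pvD_eq_getElem {xs : List Int} {v : Nat} (h : v < xs.length) : pvD xs v = xs[v] := by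
  simp [pvD, List.getD, List.getElem?_eq_getElem h]

theorem pvDistEq {n : Int} {g : List (List Int)} {s : Int}
    (hn : 1 ≤ n) (hg : pvGraphOK g (n + 1).toNat) (hs1 : 1 ≤ s) (hs2 : s ≤ n) :
    pvDijkstra s (List.replicate (n + 1).toNat pvINF) g = pvBfs n g s := by
  obtain ⟨hdl, hdg⟩ := pvDijkstra_good hn hg hs1 hs2
  obtain ⟨hbl, hbg⟩ := pvBfs_good hn hg hs1 hs2
  have huniq := pvGood_unique hdg hbg
  apply List.ext_getElem (by rw [hdl, hbl])
  intro i h1 h2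
  have hiL : i < (n + 1).toNat := by omega
  rw [← pvD_eq_getElem h1, ← pvD_eq_getElem h2]
  exact huniq i hiL
-- ---- coupling A's three farthest-node scans with B's single far() fold ----
-- (all four loops read the same (index, value) pairs in the same order)

def pvC2 (a : Int × Int × Bool) (b : Int × Int × Int × Int) : Prop :=
  a.1 = b.1 ∧ a.2.1 = b.2.2.1 ∧ a.2.2 = decide (b.2.2.2 = 1 ∧ 0 < b.1) ∧
    1 ≤ b.2.2.2 ∧ 0 ≤ b.1

def pvC3 (a : Int × Bool) (b : Int × Int × Int × Int) : Prop :=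
  a.1 = b.1 ∧ a.2 = decide (b.2.2.2 = 1 ∧ 0 < b.1) ∧ 1 ≤ b.2.2.2 ∧ 0 ≤ b.1

theorem pvScan1Couple :
    ∀ (l : List (Int × Int)) (m fi la cnt : Int),
      ((l.foldl (fun (s : Int × Int) p => if s.2 < p.2 then (p.1, p.2) else s) (fi, m)).2
        = (l.foldl (fun (s : Int × Int × Int × Int) p =>
            if s.1 < p.2 then (p.2, p.1, p.1, 1)
            else if s.1 = p.2 then (s.1, s.2.1, p.1, s.2.2.2 + 1) else s) (m, fi, la, cnt)).1) ∧
      ((l.foldl (fun (s : Int × Int) p => if s.2 < p.2 then (p.1, p.2) else s) (fi, m)).1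
        = (l.foldl (fun (s : Int × Int × Int × Int) p =>
            if s.1 < p.2 then (p.2, p.1, p.1, 1)
            else if s.1 = p.2 then (s.1, s.2.1, p.1, s.2.2.2 + 1) else s) (m, fi, la, cnt)).2.1) := by
  intro l
  induction l with
  | nil => intro m fi la cnt; exact ⟨rfl, rfl⟩
  | cons p l ih =>
    intro m fi la cnt
    simp only [List.foldl_cons]
    by_cases hlt : m < p.2
    · simp only [if_pos hlt]
      exact ih p.2 p.1 p.1 1
    · by_cases heq : m = p.2
      · simp only [if_neg hlt, if_pos heq]
        exact ih m fi p.1 (cnt + 1)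
      · simp only [if_neg hlt, if_neg heq]
        exact ih m fi la cnt

theorem pvScan2Couple :
    ∀ (l : List (Int × Int)) (m fi la cnt : Int), 1 ≤ cnt → 0 ≤ m →
      pvC2 (l.foldl (fun (s : Int × Int × Bool) p =>
          if s.1 < p.2 then (p.2, p.1, true)
          else if s.1 = p.2 then (s.1, p.1, false) else s) (m, la, decide (cnt = 1 ∧ 0 < m)))
        (l.foldl (fun (s : Int × Int × Int × Int) p =>
          if s.1 < p.2 then (p.2, p.1, p.1, 1)
          else if s.1 = p.2 then (s.1, s.2.1, p.1, s.2.2.2 + 1) else s) (m, fi, la, cnt)) := by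
  intro l
  induction l with
  | nil => intro m fi la cnt h4 h5; exact ⟨rfl, rfl, rfl, h4, h5⟩
  | cons p l ih =>
    intro m fi la cnt h4 h5
    simp only [List.foldl_cons]
    by_cases hlt : m < p.2
    · simp only [if_pos hlt]
      have e2 : ((p.2, p.1, true) : Int × Int × Bool)
          = (p.2, p.1, decide ((1 : Int) = 1 ∧ 0 < p.2)) := by
        rw [show decide ((1 : Int) = 1 ∧ 0 < p.2) = true from decide_eq_true ⟨rfl, by omega⟩]
      rw [e2]
      exact ih p.2 p.1 p.1 1 (by omega) (by omega)
    · by_cases heq : m = p.2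
      · simp only [if_neg hlt, if_pos heq]
        have e2 : ((m, p.1, false) : Int × Int × Bool)
            = (m, p.1, decide (cnt + 1 = 1 ∧ 0 < m)) := by
          rw [show decide (cnt + 1 = 1 ∧ 0 < m) = false from decide_eq_false (by omega)]
        rw [e2]
        exact ih m fi p.1 (cnt + 1) (by omega) h5
      · simp only [if_neg hlt, if_neg heq]
        exact ih m fi la cnt h4 h5

theorem pvScan3Couple :
    ∀ (l : List (Int × Int)) (m fi la cnt : Int), 1 ≤ cnt → 0 ≤ m →
      pvC3 (l.foldl (fun (s : Int × Bool) p =>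
          if s.1 < p.2 then (p.2, true)
          else if s.1 = p.2 then (s.1, false) else s) (m, decide (cnt = 1 ∧ 0 < m)))
        (l.foldl (fun (s : Int × Int × Int × Int) p =>
          if s.1 < p.2 then (p.2, p.1, p.1, 1)
          else if s.1 = p.2 then (s.1, s.2.1, p.1, s.2.2.2 + 1) else s) (m, fi, la, cnt)) := by
  intro l
  induction l with
  | nil => intro m fi la cnt h4 h5; exact ⟨rfl, rfl, h4, h5⟩
  | cons p l ih =>
    intro m fi la cnt h4 h5
    simp only [List.foldl_cons]
    by_cases hlt : m < p.2
    · simp only [if_pos hlt]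
      have e2 : ((p.2, true) : Int × Bool)
          = (p.2, decide ((1 : Int) = 1 ∧ 0 < p.2)) := by
        rw [show decide ((1 : Int) = 1 ∧ 0 < p.2) = true from decide_eq_true ⟨rfl, by omega⟩]
      rw [e2]
      exact ih p.2 p.1 p.1 1 (by omega) (by omega)
    · by_cases heq : m = p.2
      · simp only [if_neg hlt, if_pos heq]
        have e2 : ((m, false) : Int × Bool)
            = (m, decide (cnt + 1 = 1 ∧ 0 < m)) := by
          rw [show decide (cnt + 1 = 1 ∧ 0 < m) = false from decide_eq_false (by omega)]
        rw [e2]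
        exact ih m fi p.1 (cnt + 1) (by omega) h5
      · simp only [if_neg hlt, if_neg heq]
        exact ih m fi la cnt h4 h5

theorem pvFarBounds (n : Int) :
    ∀ (l : List (Int × Int)) (m fi la cnt : Int),
      (∀ p ∈ l, 1 ≤ p.1 ∧ p.1 ≤ n) →
      (1 ≤ fi ∧ fi ≤ n) → (1 ≤ la ∧ la ≤ n) →
      (let r := l.foldl (fun (s : Int × Int × Int × Int) p =>
          if s.1 < p.2 then (p.2, p.1, p.1, 1)
          else if s.1 = p.2 then (s.1, s.2.1, p.1, s.2.2.2 + 1) else s) (m, fi, la, cnt)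
       (1 ≤ r.2.1 ∧ r.2.1 ≤ n) ∧ (1 ≤ r.2.2.1 ∧ r.2.2.1 ≤ n)) := by
  intro l
  induction l with
  | nil => intro m fi la cnt _ h1 h2; exact ⟨h1, h2⟩
  | cons p l ih =>
    intro m fi la cnt hl h1 h2
    have hi := hl p (by simp)
    simp only [List.foldl_cons]
    by_cases hlt : m < p.2
    · simp only [if_pos hlt]
      exact ih _ _ _ _ (fun q hq => hl q (by simp [hq])) hi hi
    · by_cases heq : m = p.2
      · simp only [if_neg hlt, if_pos heq]
        exact ih _ _ _ _ (fun q hq => hl q (by simp [hq])) h1 hi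
      · simp only [if_neg hlt, if_neg heq]
        exact ih _ _ _ _ (fun q hq => hl q (by simp [hq])) h1 h2
-- ---- peeling the first scanned pair (the initial states only couple after one step) ----

theorem pvScan2Start (l' : List (Int × Int)) (p0 : Int × Int) (h : 0 ≤ p0.2) :
    pvC2 ((p0 :: l').foldl (fun (s : Int × Int × Bool) p =>
        if s.1 < p.2 then (p.2, p.1, true)
        else if s.1 = p.2 then (s.1, p.1, false) else s) (0, 1, true))
      ((p0 :: l').foldl (fun (s : Int × Int × Int × Int) p =>
        if s.1 < p.2 then (p.2, p.1, p.1, 1)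
        else if s.1 = p.2 then (s.1, s.2.1, p.1, s.2.2.2 + 1) else s) (0, 1, 1, 0)) := by
  simp only [List.foldl_cons]
  by_cases hlt : (0 : Int) < p0.2
  · rw [if_pos hlt, if_pos hlt]
    have e2 : ((p0.2, p0.1, true) : Int × Int × Bool)
        = (p0.2, p0.1, decide ((1 : Int) = 1 ∧ 0 < p0.2)) := by
      rw [show decide ((1 : Int) = 1 ∧ 0 < p0.2) = true from decide_eq_true ⟨rfl, hlt⟩]
    rw [e2]
    exact pvScan2Couple l' p0.2 p0.1 p0.1 1 (by omega) (by omega)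
  · have heq : (0 : Int) = p0.2 := by omega
    rw [if_neg hlt, if_pos heq, if_neg hlt, if_pos heq]
    have e2 : ((0, p0.1, false) : Int × Int × Bool)
        = (0, p0.1, decide ((0 : Int) + 1 = 1 ∧ (0 : Int) < 0)) := by
      rw [show decide ((0 : Int) + 1 = 1 ∧ (0 : Int) < 0) = false from decide_eq_false (by omega)]
    rw [e2]
    exact pvScan2Couple l' 0 1 p0.1 (0 + 1) (by omega) (by omega)

theorem pvScan3Start (l' : List (Int × Int)) (p0 : Int × Int) (h : 0 ≤ p0.2) :
    pvC3 ((p0 :: l').foldl (fun (s : Int × Bool) p =>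
        if s.1 < p.2 then (p.2, true)
        else if s.1 = p.2 then (s.1, false) else s) (0, true))
      ((p0 :: l').foldl (fun (s : Int × Int × Int × Int) p =>
        if s.1 < p.2 then (p.2, p.1, p.1, 1)
        else if s.1 = p.2 then (s.1, s.2.1, p.1, s.2.2.2 + 1) else s) (0, 1, 1, 0)) := by
  simp only [List.foldl_cons]
  by_cases hlt : (0 : Int) < p0.2
  · rw [if_pos hlt, if_pos hlt]
    have e2 : ((p0.2, true) : Int × Bool)
        = (p0.2, decide ((1 : Int) = 1 ∧ 0 < p0.2)) := by
      rw [show decide ((1 : Int) = 1 ∧ 0 < p0.2) = true from decide_eq_true ⟨rfl, hlt⟩]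
    rw [e2]
    exact pvScan3Couple l' p0.2 p0.1 p0.1 1 (by omega) (by omega)
  · have heq : (0 : Int) = p0.2 := by omega
    rw [if_neg hlt, if_pos heq, if_neg hlt, if_pos heq]
    have e2 : ((0, false) : Int × Bool)
        = (0, decide ((0 : Int) + 1 = 1 ∧ (0 : Int) < 0)) := by
      rw [show decide ((0 : Int) + 1 = 1 ∧ (0 : Int) < 0) = false from decide_eq_false (by omega)]
    rw [e2]
    exact pvScan3Couple l' 0 1 p0.1 (0 + 1) (by omega) (by omega)
-- ---- final assembly, innermost phase first ----

theorem pvD_one_nonneg {n : Int} {edges : List (Int × Int)} (hn : 1 ≤ n)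
    (hE : ∀ e ∈ edges, (-(n + 1) ≤ e.1 ∧ e.1 ≤ n) ∧ (-(n + 1) ≤ e.2 ∧ e.2 ≤ n))
    (s : Int) (hs1 : 1 ≤ s) (hs2 : s ≤ n) :
    0 ≤ pvD (pvBfs n (pvBuildGraph n edges) s) 1 := by
  obtain ⟨hlen, hgood⟩ := pvBfs_good hn (pvBuildGraph_ok hn hE) hs1 hs2
  exact (hgood 1 (by omega)).1.1

-- zip(range(1, n+1), d[1:]) starts with the pair (1, d[1])
theorem pvZipCons {n : Int} (hn : 1 ≤ n) {d : List Int} (hlen : d.length = (n + 1).toNat) :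
    List.zip (PySem.List.pyRange 1 (n + 1) 1) (d.drop 1)
      = (1, pvD d 1) :: List.zip (PySem.List.pyRange (1 + 1) (n + 1) 1) ((d.drop 1).tail) := by
  match d with
  | [] => simp at hlen; omega
  | [a] => simp at hlen; omega
  | a :: b :: t =>
    rw [PySem.List.pyRange_one_cons (by omega : (1 : Int) < n + 1)]
    simp [pvD, List.getD]

theorem pvZipMem {n : Int} {d : List Int} {p : Int × Int}
    (hp : p ∈ List.zip (PySem.List.pyRange 1 (n + 1) 1) (d.drop 1)) :
    (1 ≤ p.1 ∧ p.1 ≤ n) ∧ p.2 ∈ d := by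
  obtain ⟨h1, h2⟩ := List.of_mem_zip hp
  have := PySem.List.mem_pyRange_one.1 h1
  exact ⟨by omega, List.mem_of_mem_drop h2⟩

theorem pvPhase3eq {n : Int} {edges : List (Int × Int)} (hn : 1 ≤ n)
    (hE : ∀ e ∈ edges, (-(n + 1) ≤ e.1 ∧ e.1 ≤ n) ∧ (-(n + 1) ≤ e.2 ∧ e.2 ≤ n))
    (idx : Int) (h1 : 1 ≤ idx) (h2 : idx ≤ n) :
    (if ((List.zip (PySem.List.pyRange 1 (n + 1) 1) ((pvDijkstra idx (List.replicate (n + 1).toNat pvINF) (pvBuildGraph n edges)).drop 1)).foldl (fun (s : Int × Bool) p => if s.1 < p.2 then (p.2, true) else if s.1 = p.2 then (s.1, false) else s) (0, true)).2 = false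
     then ((List.zip (PySem.List.pyRange 1 (n + 1) 1) ((pvDijkstra idx (List.replicate (n + 1).toNat pvINF) (pvBuildGraph n edges)).drop 1)).foldl (fun (s : Int × Bool) p => if s.1 < p.2 then (p.2, true) else if s.1 = p.2 then (s.1, false) else s) (0, true)).1
     else ((List.zip (PySem.List.pyRange 1 (n + 1) 1) ((pvDijkstra idx (List.replicate (n + 1).toNat pvINF) (pvBuildGraph n edges)).drop 1)).foldl (fun (s : Int × Bool) p => if s.1 < p.2 then (p.2, true) else if s.1 = p.2 then (s.1, false) else s) (0, true)).1 - 1)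
    =
    (if ((List.zip (PySem.List.pyRange 1 (n + 1) 1) ((pvBfs n (pvBuildGraph n edges) idx).drop 1)).foldl (fun (s : Int × Int × Int × Int) p => if s.1 < p.2 then (p.2, p.1, p.1, 1) else if s.1 = p.2 then (s.1, s.2.1, p.1, s.2.2.2 + 1) else s) (0, 1, 1, 0)).1 = 0 ∨ 1 < ((List.zip (PySem.List.pyRange 1 (n + 1) 1) ((pvBfs n (pvBuildGraph n edges) idx).drop 1)).foldl (fun (s : Int × Int × Int × Int) p => if s.1 < p.2 then (p.2, p.1, p.1, 1) else if s.1 = p.2 then (s.1, s.2.1, p.1, s.2.2.2 + 1) else s) (0, 1, 1, 0)).2.2.2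
     then ((List.zip (PySem.List.pyRange 1 (n + 1) 1) ((pvBfs n (pvBuildGraph n edges) idx).drop 1)).foldl (fun (s : Int × Int × Int × Int) p => if s.1 < p.2 then (p.2, p.1, p.1, 1) else if s.1 = p.2 then (s.1, s.2.1, p.1, s.2.2.2 + 1) else s) (0, 1, 1, 0)).1
     else ((List.zip (PySem.List.pyRange 1 (n + 1) 1) ((pvBfs n (pvBuildGraph n edges) idx).drop 1)).foldl (fun (s : Int × Int × Int × Int) p => if s.1 < p.2 then (p.2, p.1, p.1, 1) else if s.1 = p.2 then (s.1, s.2.1, p.1, s.2.2.2 + 1) else s) (0, 1, 1, 0)).1 - 1) := by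
  rw [pvDistEq hn (pvBuildGraph_ok hn hE) h1 h2]
  obtain ⟨hlen, _⟩ := pvBfs_good hn (pvBuildGraph_ok hn hE) h1 h2
  have hc3 : pvC3 ((List.zip (PySem.List.pyRange 1 (n + 1) 1) ((pvBfs n (pvBuildGraph n edges) idx).drop 1)).foldl (fun (s : Int × Bool) p => if s.1 < p.2 then (p.2, true) else if s.1 = p.2 then (s.1, false) else s) (0, true)) ((List.zip (PySem.List.pyRange 1 (n + 1) 1) ((pvBfs n (pvBuildGraph n edges) idx).drop 1)).foldl (fun (s : Int × Int × Int × Int) p => if s.1 < p.2 then (p.2, p.1, p.1, 1) else if s.1 = p.2 then (s.1, s.2.1, p.1, s.2.2.2 + 1) else s) (0, 1, 1, 0)) := by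
    rw [pvZipCons hn hlen]
    exact pvScan3Start _ _ (pvD_one_nonneg hn hE idx h1 h2)
  obtain ⟨c31, c33, c34, c35⟩ := hc3
  apply if_congr
  · rw [c33, decide_eq_false_iff_not]
    omega
  · exact c31
  · rw [c31]
theorem pvPhase2eq {n : Int} {edges : List (Int × Int)} (hn : 1 ≤ n)
    (hE : ∀ e ∈ edges, (-(n + 1) ≤ e.1 ∧ e.1 ≤ n) ∧ (-(n + 1) ≤ e.2 ∧ e.2 ≤ n))
    (st : Int) (h1 : 1 ≤ st) (h2 : st ≤ n) :
    (if ((List.zip (PySem.List.pyRange 1 (n + 1) 1) ((pvDijkstra st (List.replicate (n + 1).toNat pvINF) (pvBuildGraph n edges)).drop 1)).foldl (fun (s : Int × Int × Bool) p => if s.1 < p.2 then (p.2, p.1, true) else if s.1 = p.2 then (s.1, p.1, false) else s) (0, 1, true)).2.2 = false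
     then ((List.zip (PySem.List.pyRange 1 (n + 1) 1) ((pvDijkstra st (List.replicate (n + 1).toNat pvINF) (pvBuildGraph n edges)).drop 1)).foldl (fun (s : Int × Int × Bool) p => if s.1 < p.2 then (p.2, p.1, true) else if s.1 = p.2 then (s.1, p.1, false) else s) (0, 1, true)).1
     else
      (if ((List.zip (PySem.List.pyRange 1 (n + 1) 1) ((pvDijkstra ((List.zip (PySem.List.pyRange 1 (n + 1) 1) ((pvDijkstra st (List.replicate (n + 1).toNat pvINF) (pvBuildGraph n edges)).drop 1)).foldl (fun (s : Int × Int × Bool) p => if s.1 < p.2 then (p.2, p.1, true) else if s.1 = p.2 then (s.1, p.1, false) else s) (0, 1, true)).2.1 (List.replicate (n + 1).toNat pvINF) (pvBuildGraph n edges)).drop 1)).foldl (fun (s : Int × Bool) p => if s.1 < p.2 then (p.2, true) else if s.1 = p.2 then (s.1, false) else s) (0, true)).2 = false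
       then ((List.zip (PySem.List.pyRange 1 (n + 1) 1) ((pvDijkstra ((List.zip (PySem.List.pyRange 1 (n + 1) 1) ((pvDijkstra st (List.replicate (n + 1).toNat pvINF) (pvBuildGraph n edges)).drop 1)).foldl (fun (s : Int × Int × Bool) p => if s.1 < p.2 then (p.2, p.1, true) else if s.1 = p.2 then (s.1, p.1, false) else s) (0, 1, true)).2.1 (List.replicate (n + 1).toNat pvINF) (pvBuildGraph n edges)).drop 1)).foldl (fun (s : Int × Bool) p => if s.1 < p.2 then (p.2, true) else if s.1 = p.2 then (s.1, false) else s) (0, true)).1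
       else ((List.zip (PySem.List.pyRange 1 (n + 1) 1) ((pvDijkstra ((List.zip (PySem.List.pyRange 1 (n + 1) 1) ((pvDijkstra st (List.replicate (n + 1).toNat pvINF) (pvBuildGraph n edges)).drop 1)).foldl (fun (s : Int × Int × Bool) p => if s.1 < p.2 then (p.2, p.1, true) else if s.1 = p.2 then (s.1, p.1, false) else s) (0, 1, true)).2.1 (List.replicate (n + 1).toNat pvINF) (pvBuildGraph n edges)).drop 1)).foldl (fun (s : Int × Bool) p => if s.1 < p.2 then (p.2, true) else if s.1 = p.2 then (s.1, false) else s) (0, true)).1 - 1))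
    =
    (if (pvFar n (pvBfs n (pvBuildGraph n edges) st)).1 = 0 ∨
        1 < (pvFar n (pvBfs n (pvBuildGraph n edges) st)).2.2.2
     then (pvFar n (pvBfs n (pvBuildGraph n edges) st)).1
     else
      (if (pvFar n (pvBfs n (pvBuildGraph n edges)
            (pvFar n (pvBfs n (pvBuildGraph n edges) st)).2.2.1)).1 = 0 ∨
          1 < (pvFar n (pvBfs n (pvBuildGraph n edges)
            (pvFar n (pvBfs n (pvBuildGraph n edges) st)).2.2.1)).2.2.2
       then (pvFar n (pvBfs n (pvBuildGraph n edges)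
            (pvFar n (pvBfs n (pvBuildGraph n edges) st)).2.2.1)).1
       else (pvFar n (pvBfs n (pvBuildGraph n edges)
            (pvFar n (pvBfs n (pvBuildGraph n edges) st)).2.2.1)).1 - 1)) := by
  simp only [pvFar]
  rw [pvDistEq hn (pvBuildGraph_ok hn hE) h1 h2]
  obtain ⟨hlen, _⟩ := pvBfs_good hn (pvBuildGraph_ok hn hE) h1 h2
  have hc2 : pvC2 ((List.zip (PySem.List.pyRange 1 (n + 1) 1) ((pvBfs n (pvBuildGraph n edges) st).drop 1)).foldl (fun (s : Int × Int × Bool) p => if s.1 < p.2 then (p.2, p.1, true) else if s.1 = p.2 then (s.1, p.1, false) else s) (0, 1, true)) ((List.zip (PySem.List.pyRange 1 (n + 1) 1) ((pvBfs n (pvBuildGraph n edges) st).drop 1)).foldl (fun (s : Int × Int × Int × Int) p => if s.1 < p.2 then (p.2, p.1, p.1, 1) else if s.1 = p.2 then (s.1, s.2.1, p.1, s.2.2.2 + 1) else s) (0, 1, 1, 0)) := by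
    rw [pvZipCons hn hlen]
    exact pvScan2Start _ _ (pvD_one_nonneg hn hE st h1 h2)
  obtain ⟨c21, c22, c23, c24, c25⟩ := hc2
  obtain ⟨_, hb2⟩ := pvFarBounds n (List.zip (PySem.List.pyRange 1 (n + 1) 1) ((pvBfs n (pvBuildGraph n edges) st).drop 1)) 0 1 1 0
    (fun p hp => (pvZipMem hp).1) ⟨le_refl 1, hn⟩ ⟨le_refl 1, hn⟩
  apply if_congr
  · rw [c23, decide_eq_false_iff_not]
    omega
  · exact c21
  · rw [c22]
    exact pvPhase3eq hn hE _ hb2.1 hb2.2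
theorem pvSolutionEq {n : Int} {edges : List (Int × Int)}
    (hn : 1 ≤ n)
    (hE : ∀ e ∈ edges, (-(n + 1) ≤ e.1 ∧ e.1 ≤ n) ∧ (-(n + 1) ≤ e.2 ∧ e.2 ≤ n)) :
    solution n edges = solution_alt n edges := by
  obtain ⟨c11, c12⟩ := pvScan1Couple (List.zip (PySem.List.pyRange 1 (n + 1) 1) ((pvBfs n (pvBuildGraph n edges) 1).drop 1)) 0 1 1 0
  obtain ⟨hb1, _⟩ := pvFarBounds n (List.zip (PySem.List.pyRange 1 (n + 1) 1) ((pvBfs n (pvBuildGraph n edges) 1).drop 1)) 0 1 1 0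
    (fun p hp => (pvZipMem hp).1) ⟨le_refl 1, hn⟩ ⟨le_refl 1, hn⟩
  simp only [solution, solution_alt]
  rw [pvDistEq hn (pvBuildGraph_ok hn hE) (by omega) hn]
  have c12' : ((List.zip (PySem.List.pyRange 1 (n + 1) 1) ((pvBfs n (pvBuildGraph n edges) 1).drop 1)).foldl (fun (s : Int × Int) p => if s.2 < p.2 then (p.1, p.2) else s) (1, 0)).1
      = (pvFar n (pvBfs n (pvBuildGraph n edges) 1)).2.1 := c12
  rw [c12']
  have hb1a : 1 ≤ (pvFar n (pvBfs n (pvBuildGraph n edges) 1)).2.1 := hb1.1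
  have hb1b : (pvFar n (pvBfs n (pvBuildGraph n edges) 1)).2.1 ≤ n := hb1.2
  exact pvPhase2eq hn hE _ hb1a hb1b

-- ===== VERDICT (by name: the statement is the Claim_ definition above) =====
theorem solution_spec : Claim_equal_solution := by
  intro n edges _ hPre
  show solution n edges = solution_alt n edges
  exact pvSolutionEq hPre.1 hPre.2
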